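-- pv_equiv track=rewrite | github.com/broniu155/Football_portfolio | app/components/lineups.py | _pick_primary_position
-- ===== SOURCE A (Python) =====
-- from typing import Any
--
-- def _clock_to_seconds(value: Any) -> int:
--     text = str(value or "").strip()
--     if not text:
--         return 10**9
--     parts = text.split(":")
--     try:
--         if len(parts) == 2:
--             return int(parts[0]) * 60 + int(parts[1])
--         if len(parts) == 3:
--             return int(parts[0]) * 3600 + int(parts[1]) * 60 + int(parts[2])
--     except ValueError:
--         return 10**9
--     return 10**9
--
-- def _pick_primary_position(positions: list[dict[str, Any]]) -> dict[str, Any] | None: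
--     if not positions:
--         return None
--     valid = [seg for seg in positions if isinstance(seg, dict)]
--     if not valid:
--         return None
--
--     starters_0000 = [
--         seg
--         for seg in valid
--         if str(seg.get("start_reason") or "").strip().lower() == "starting xi"
--         and str(seg.get("from") or "").strip() == "00:00"
--     ]
--     if starters_0000:
--         return starters_0000[0]
--
--     starters = [seg for seg in valid if str(seg.get("start_reason") or "").strip().lower() == "starting xi"]
--     if starters:
--         return sorted(starters, key=lambda seg: _clock_to_seconds(seg.get("from")))[0]
--
--     return sorted(valid, key=lambda seg: _clock_to_seconds(seg.get("from")))[0]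
-- ===== SOURCE B (Python) =====
-- from typing import Any
--
-- def _clock_to_seconds(value: Any) -> int:
--     text = str(value or "").strip()
--     if not text:
--         return 10**9
--     parts = text.split(":")
--     try:
--         if len(parts) == 2:
--             return int(parts[0]) * 60 + int(parts[1])
--         if len(parts) == 3:
--             return int(parts[0]) * 3600 + int(parts[1]) * 60 + int(parts[2])
--     except ValueError:
--         return 10**9
--     return 10**9
--
-- def _pick_primary_position(positions):
--     best_key = None
--     best_seg = None
--     for i, seg in enumerate(positions):
--         if not isinstance(seg, dict):
--             continue
--         starter = str(seg.get("start_reason") or "").strip().lower() == "starting xi"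
--         if starter and str(seg.get("from") or "").strip() == "00:00":
--             tier = 0
--         elif starter:
--             tier = 1
--         else:
--             tier = 2
--         key = (tier, _clock_to_seconds(seg.get("from")), i)
--         if best_key is None or key < best_key:
--             best_key, best_seg = key, seg
--     return best_seg
-- ===== Notes on version B (the rewrite author's own statement) =====
-- stated objective: simpler
-- what changed: Replaces the three filter-then-sort tiers by one pass that keeps the segment minimising the composite key (tier, clock seconds, index), where tier encodes starting-XI/00:00 priority and the index reproduces the stable-sort tie-breaks.
import Mathlib
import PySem

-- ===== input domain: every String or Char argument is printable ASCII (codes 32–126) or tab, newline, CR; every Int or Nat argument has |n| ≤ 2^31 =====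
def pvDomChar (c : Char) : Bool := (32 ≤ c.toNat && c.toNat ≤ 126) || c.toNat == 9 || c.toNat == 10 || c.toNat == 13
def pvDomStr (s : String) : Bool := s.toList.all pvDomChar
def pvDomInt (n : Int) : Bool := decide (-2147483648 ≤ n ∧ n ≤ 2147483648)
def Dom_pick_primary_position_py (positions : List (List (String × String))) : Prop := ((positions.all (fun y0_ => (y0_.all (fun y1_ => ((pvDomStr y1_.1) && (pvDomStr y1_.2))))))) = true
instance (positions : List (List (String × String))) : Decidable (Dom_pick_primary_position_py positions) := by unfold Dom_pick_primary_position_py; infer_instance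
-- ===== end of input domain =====

-- B replaces A's three filter-then-sort tiers by one left-to-right pass keeping the
-- segment with the minimal composite key (tier, clock seconds, index); same result, proved equal.

-- ===== PORT A =====
-- shared helper _clock_to_seconds (value is seg.get(...), an Option String here;
-- str(value or "") = Option.getD "" since str of a string is itself)
def clockToSeconds (value : Option String) : Int :=
  let text := PySem.Str.strip (value.getD "")
  if text == "" then 10 ^ 9
  else
    let parts := (PySem.Str.split? text ":").getD []   -- ":" ≠ "" so split? never returns none
    match parts with
    | [a, b] =>
      match PySem.Int.ofStr? a, PySem.Int.ofStr? b with
      | some x, some y => x * 60 + y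
      | _, _ => 10 ^ 9                                  -- ValueError branch
    | [a, b, c] =>
      match PySem.Int.ofStr? a, PySem.Int.ofStr? b, PySem.Int.ofStr? c with
      | some x, some y, some z => x * 3600 + y * 60 + z
      | _, _, _ => 10 ^ 9                               -- ValueError branch
    | _ => 10 ^ 9

-- str(seg.get(k) or ""): the dict built from the pair list, looked up, None/"" → ""
def segGet (seg : List (String × String)) (k : String) : Option String :=
  (PySem.Dict.ofList seg).get? k

def segGetStr (seg : List (String × String)) (k : String) : String :=
  (segGet seg k).getD ""

def isStarterB (seg : List (String × String)) : Bool :=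
  PySem.Str.lower (PySem.Str.strip (segGetStr seg "start_reason")) == "starting xi"

def isT0B (seg : List (String × String)) : Bool :=
  isStarterB seg && (PySem.Str.strip (segGetStr seg "from") == "00:00")

def pick_primary_position_py (positions : List (List (String × String))) : Option (List (String × String)) :=
  if positions = [] then none
  -- isinstance(seg, dict) is identically true under the type convention, so valid = positions
  -- (the Python locals valid/starters0000/starters are pure; they are inlined here)
  else if positions = [] then none        -- 'if not valid'
  else
    match positions.filter isT0B with     -- starters_0000
    | s :: _ => some s
    | [] =>
      if positions.filter isStarterB ≠ [] then   -- starters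
        (PySem.List.sorted (positions.filter isStarterB)
          (fun seg => clockToSeconds (segGet seg "from"))).head?
      else
        (PySem.List.sorted positions (fun seg => clockToSeconds (segGet seg "from"))).head?

-- ===== PORT B =====
-- Python tuple '<' on (int, int, int), lexicographic
def keyLt3 (a b : Int × Int × Int) : Bool :=
  decide (a.1 < b.1 ∨ (a.1 = b.1 ∧ (a.2.1 < b.2.1 ∨ (a.2.1 = b.2.1 ∧ a.2.2 < b.2.2))))

-- the body of B's loop (one iteration: compute tier and key, keep the smaller)
def stepB (best : Option ((Int × Int × Int) × List (String × String)))
    (p : Int × List (String × String)) :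
    Option ((Int × Int × Int) × List (String × String)) :=
  let i := p.1
  let seg := p.2
  let starter := isStarterB seg
  let tier : Int :=
    if starter && (PySem.Str.strip (segGetStr seg "from") == "00:00") then 0
    else if starter then 1 else 2
  let key := (tier, clockToSeconds (segGet seg "from"), i)
  match best with
  | none => some (key, seg)
  | some (bk, bs) => if keyLt3 key bk then some (key, seg) else some (bk, bs)

def pick_primary_position_py_alt (positions : List (List (String × String))) : Option (List (String × String)) :=
  -- the 'continue' for non-dict entries is unreachable under the type convention
  let best := (PySem.List.enumerate positions).foldl stepB none
  match best with
  | none => none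
  | some (_, seg) => some seg

-- ===== PRECONDITION & SPEC =====
def Spec_pick_primary_position_py (positions : List (List (String × String))) (out : Option (List (String × String))) : Prop := out = pick_primary_position_py_alt positions
instance (positions : List (List (String × String))) (out : Option (List (String × String))) : Decidable (Spec_pick_primary_position_py positions out) := by unfold Spec_pick_primary_position_py; infer_instance

-- ===== CLAIM (what is proved, stated in full; the proofs are below) =====
def Claim_equal_pick_primary_position_py : Prop := ∀ (positions : List (List (String × String))), Dom_pick_primary_position_py positions → Spec_pick_primary_position_py positions (pick_primary_position_py positions)

-- ===== LEMMAS AND PROOFS =====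

-- tier of a segment, and the (tier, seconds) pair key
def tierOf (seg : List (String × String)) : Int :=
  if isT0B seg then 0 else if isStarterB seg then 1 else 2

def secsOf (seg : List (String × String)) : Int := clockToSeconds (segGet seg "from")

def pLt (a b : Int × Int) : Bool :=
  decide (a.1 < b.1 ∨ (a.1 = b.1 ∧ a.2 < b.2))

def pkey (seg : List (String × String)) : Int × Int := (tierOf seg, secsOf seg)

-- first minimum of the pair key over b :: xs (keeps the earlier on ties)
def gP (b x : List (String × String)) : List (String × String) :=
  if pLt (pkey x) (pkey b) then x else b

-- first minimum of the seconds key (A's sort key) over b :: xs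
def gS (b x : List (String × String)) : List (String × String) :=
  if secsOf x < secsOf b then x else b

theorem secsOf_of_T0 (seg : List (String × String)) (h : isT0B seg = true) : secsOf seg = 0 := by
  have h2 : PySem.Str.strip ((segGet seg "from").getD "") = "00:00" := by
    simp [isT0B, segGetStr] at h; exact h.2
  simp only [secsOf, clockToSeconds, h2]
  decide

theorem tierOf_nonneg (z : List (String × String)) : 0 ≤ tierOf z := by
  unfold tierOf; split_ifs <;> omega

theorem t0_of_tier_zero (z : List (String × String)) (h : tierOf z = 0) : isT0B z = true := by
  unfold tierOf at h; split_ifs at h <;> simp_all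

theorem tier_pos_of_not_t0 (m : List (String × String)) (h : isT0B m = false) : 0 < tierOf m := by
  unfold tierOf; split_ifs <;> simp_all

theorem tierOf_eq_one (m : List (String × String)) (h0 : isT0B m = false)
    (h1 : isStarterB m = true) : tierOf m = 1 := by
  simp [tierOf, h0, h1]

theorem tierOf_eq_two (m : List (String × String)) (h0 : isT0B m = false)
    (h1 : isStarterB m = false) : tierOf m = 2 := by
  simp [tierOf, h0, h1]

theorem pLt_iff (t1 s1 t2 s2 : Int) :
    pLt (t1, s1) (t2, s2) = true ↔ (t1 < t2 ∨ (t1 = t2 ∧ s1 < s2)) := by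
  simp [pLt]

theorem pLt_pkey_iff (z m : List (String × String)) :
    pLt (pkey z) (pkey m) = true ↔
      (tierOf z < tierOf m ∨ (tierOf z = tierOf m ∧ secsOf z < secsOf m)) :=
  pLt_iff (tierOf z) (secsOf z) (tierOf m) (secsOf m)

theorem gP_eq_right (b x : List (String × String)) (h : pLt (pkey x) (pkey b) = true) :
    gP b x = x := by
  unfold gP; rw [h]; rfl

theorem gP_eq_left (b x : List (String × String)) (h : pLt (pkey x) (pkey b) = false) :
    gP b x = b := by
  unfold gP; rw [h]; rfl

theorem gS_eq_right (b x : List (String × String)) (h : secsOf x < secsOf b) :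
    gS b x = x := by
  unfold gS; rw [if_pos h]

theorem gS_eq_left (b x : List (String × String)) (h : ¬ secsOf x < secsOf b) :
    gS b x = b := by
  unfold gS; rw [if_neg h]

theorem gP_of_t0_left (s z : List (String × String)) (h : isT0B s = true) : gP s z = s := by
  apply gP_eq_left
  rw [← Bool.not_eq_true, pLt_pkey_iff]
  push_neg
  have hts : tierOf s = 0 := by simp [tierOf, h]
  have hss : secsOf s = 0 := secsOf_of_T0 s h
  rw [hts, hss]
  refine ⟨tierOf_nonneg z, fun hz => ?_⟩
  rw [secsOf_of_T0 z (t0_of_tier_zero z hz)]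

theorem gP_of_t0_right (m z : List (String × String)) (hz : isT0B z = true)
    (hm : isT0B m = false) : gP m z = z := by
  apply gP_eq_right
  rw [pLt_pkey_iff]
  left
  have htz : tierOf z = 0 := by simp [tierOf, hz]
  have := tier_pos_of_not_t0 m hm
  omega

theorem gP_eq_gS_of_tier (m z : List (String × String)) (h : tierOf m = tierOf z) :
    gP m z = gS m z := by
  by_cases hs : secsOf z < secsOf m
  · rw [gP_eq_right m z (by rw [pLt_pkey_iff]; exact Or.inr ⟨h.symm, hs⟩), gS_eq_right m z hs]
  · have hfalse : pLt (pkey z) (pkey m) = false := by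
      rw [← Bool.not_eq_true, pLt_pkey_iff]
      push_neg
      exact ⟨by omega, fun _ => by omega⟩
    rw [gP_eq_left m z hfalse, gS_eq_left m z hs]

theorem gP_keep_of_tier_lt (m z : List (String × String)) (h : tierOf m < tierOf z) :
    gP m z = m := by
  apply gP_eq_left
  rw [← Bool.not_eq_true, pLt_pkey_iff]
  push_neg
  exact ⟨by omega, fun hx => by omega⟩

theorem gP_take_of_tier_lt (m z : List (String × String)) (h : tierOf z < tierOf m) :
    gP m z = z := by
  apply gP_eq_right
  rw [pLt_pkey_iff]
  left; omega

theorem foldl_pick_mem {α : Type} (g : α → α → α) (hg : ∀ b x, g b x = b ∨ g b x = x) :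
    ∀ (xs : List α) (b : α), xs.foldl g b ∈ b :: xs := by
  intro xs
  induction xs with
  | nil => intro b; simp
  | cons x xs ih =>
    intro b
    simp only [List.foldl_cons]
    rcases hg b x with h | h <;> rw [h]
    · rcases List.mem_cons.1 (ih b) with h2 | h2 <;> simp [h2]
    · rcases List.mem_cons.1 (ih x) with h2 | h2 <;> simp [h2]

theorem gS_choice (b x : List (String × String)) : gS b x = b ∨ gS b x = x := by
  unfold gS; by_cases h : secsOf x < secsOf b <;> simp [h]

-- head of the stable insertion sort is the first minimum of the key
theorem head?_insertBy (key : List (String × String) → Int) (x : List (String × String))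
    (acc : List (List (String × String))) (b : List (String × String)) (h : acc.head? = some b) :
    (PySem.List.insertBy (fun a c => decide (key a < key c)) x acc).head? =
      some (if key x < key b then x else b) := by
  cases acc with
  | nil => simp at h
  | cons y ys =>
    simp at h
    subst h
    simp only [PySem.List.insertBy]
    split <;> simp_all

theorem head?_sorted_foldl (key : List (String × String) → Int)
    (xs : List (List (String × String))) (acc : List (List (String × String)))
    (b : List (String × String)) (h : acc.head? = some b) :
    (xs.foldl (fun acc x => PySem.List.insertBy (fun a c => decide (key a < key c)) x acc) acc).head? =
      some (xs.foldl (fun b x => if key x < key b then x else b) b) := by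
  induction xs generalizing acc b with
  | nil => simpa using h
  | cons x xs ih =>
    simp only [List.foldl_cons]
    exact ih _ _ (head?_insertBy key x acc b h)

theorem head?_sorted (key : List (String × String) → Int)
    (x : List (String × String)) (xs : List (List (String × String))) :
    (PySem.List.sorted (x :: xs) key).head? =
      some (xs.foldl (fun b y => if key y < key b then y else b) x) := by
  rw [PySem.List.sorted_eq_foldl_insertBy]
  simp only [List.foldl_cons]
  exact head?_sorted_foldl key xs _ x (by simp [PySem.List.insertBy])

-- A on a nonempty list, one lemma per branch of A
theorem a_eq_t0 (x : List (String × String)) (xs : List (List (String × String)))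
    (s : List (String × String)) (t : List (List (String × String)))
    (hf : (x :: xs).filter isT0B = s :: t) :
    pick_primary_position_py (x :: xs) = some s := by
  rw [pick_primary_position_py.eq_def,
    if_neg (List.cons_ne_nil x xs), if_neg (List.cons_ne_nil x xs), hf]

theorem a_eq_st (x : List (String × String)) (xs : List (List (String × String)))
    (s : List (String × String)) (ss : List (List (String × String)))
    (hf : (x :: xs).filter isT0B = [])
    (hs : (x :: xs).filter isStarterB = s :: ss) :
    pick_primary_position_py (x :: xs) = some (ss.foldl gS s) := by
  rw [pick_primary_position_py.eq_def,
    if_neg (List.cons_ne_nil x xs), if_neg (List.cons_ne_nil x xs), hf, hs]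
  dsimp only
  rw [if_pos (List.cons_ne_nil s ss), head?_sorted]
  rfl

theorem a_eq_no (x : List (String × String)) (xs : List (List (String × String)))
    (hf : (x :: xs).filter isT0B = [])
    (hs : (x :: xs).filter isStarterB = []) :
    pick_primary_position_py (x :: xs) = some (xs.foldl gS x) := by
  rw [pick_primary_position_py.eq_def,
    if_neg (List.cons_ne_nil x xs), if_neg (List.cons_ne_nil x xs), hf, hs]
  dsimp only
  rw [if_neg (by simp), head?_sorted]
  rfl

-- B side: one step of the loop, with the tier expression folded into tierOf
theorem stepB_some (bk : Int × Int × Int) (b : List (String × String))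
    (i : Int) (x : List (String × String)) :
    stepB (some (bk, b)) (i, x) =
      if keyLt3 (tierOf x, secsOf x, i) bk then some ((tierOf x, secsOf x, i), x)
      else some (bk, b) := by
  have htier : (if isStarterB x && (PySem.Str.strip (segGetStr x "from") == "00:00") then (0:Int)
      else if isStarterB x then 1 else 2) = tierOf x := by
    simp [tierOf, isT0B]
  simp only [stepB, htier, secsOf]

theorem stepB_none (i : Int) (x : List (String × String)) :
    stepB none (i, x) = some ((tierOf x, secsOf x, i), x) := by
  have htier : (if isStarterB x && (PySem.Str.strip (segGetStr x "from") == "00:00") then (0:Int)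
      else if isStarterB x then 1 else 2) = tierOf x := by
    simp [tierOf, isT0B]
  simp only [stepB, htier, secsOf]

theorem keyLt3_pLt (x b : List (String × String)) (i j : Int) (hj : j < i) :
    keyLt3 (tierOf x, secsOf x, i) (tierOf b, secsOf b, j) = pLt (pkey x) (pkey b) := by
  simp only [keyLt3, pLt, pkey]
  by_cases h1 : tierOf x < tierOf b <;> by_cases h2 : tierOf x = tierOf b <;>
    by_cases h3 : secsOf x < secsOf b <;> by_cases h4 : secsOf x = secsOf b <;>
    simp_all <;> omega

-- B's loop computes the first minimum of the pair key (the index component only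
-- breaks ties in favour of the earlier element, which the fold keeps anyway)
theorem alt_loop (xs : List (List (String × String))) :
    ∀ (i j : Int) (b : List (String × String)), j < i →
    ∃ j', (PySem.List.enumerate xs i).foldl stepB (some ((tierOf b, secsOf b, j), b)) =
        some ((tierOf (xs.foldl gP b), secsOf (xs.foldl gP b), j'), xs.foldl gP b) ∧
      j' < i + xs.length := by
  induction xs with
  | nil =>
    intro i j b hj
    exact ⟨j, by simp [PySem.List.enumerate], by simpa using hj⟩
  | cons x xs ih =>
    intro i j b hj
    rw [PySem.List.enumerate_cons]
    simp only [List.foldl_cons, stepB_some, keyLt3_pLt x b i j hj]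
    by_cases hlt : pLt (pkey x) (pkey b) = true
    · rw [if_pos hlt]
      rcases ih (i + 1) i x (by omega) with ⟨j', h1, h2⟩
      refine ⟨j', ?_, by simp at h2 ⊢; omega⟩
      rw [show gP b x = x from gP_eq_right b x hlt]
      exact h1
    · rw [if_neg (by simpa using hlt)]
      rcases ih (i + 1) j b (by omega) with ⟨j', h1, h2⟩
      refine ⟨j', ?_, by simp at h2 ⊢; omega⟩
      rw [show gP b x = b from gP_eq_left b x (by simpa using hlt)]
      exact h1

theorem alt_eq (x : List (String × String)) (xs : List (List (String × String))) :
    pick_primary_position_py_alt (x :: xs) = some (xs.foldl gP x) := by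
  unfold pick_primary_position_py_alt
  rw [PySem.List.enumerate_cons]
  simp only [List.foldl_cons, stepB_none]
  rcases alt_loop xs 1 0 x (by omega) with ⟨j', h1, _⟩
  rw [show (0:Int) + 1 = 1 from rfl, h1]

-- the main equivalence, by induction from the right
theorem main_eq (positions : List (List (String × String))) :
    pick_primary_position_py positions = pick_primary_position_py_alt positions := by
  induction positions using List.reverseRecOn with
  | nil => rfl
  | append_singleton xs z ih =>
    cases xs with
    | nil =>
      rw [List.nil_append, alt_eq]
      by_cases h0 : isT0B z = true
      · rw [a_eq_t0 z [] z [] (by simp [h0]), List.foldl_nil]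
      · by_cases h1 : isStarterB z = true
        · rw [a_eq_st z [] z [] (by simp [h0]) (by simp [h1]), List.foldl_nil, List.foldl_nil]
        · rw [a_eq_no z [] (by simp [h0]) (by simp [h1]), List.foldl_nil, List.foldl_nil]
    | cons x xs' =>
      rw [List.cons_append, alt_eq, List.foldl_append, List.foldl_cons, List.foldl_nil]
      rw [alt_eq] at ih
      cases hf : (x :: xs').filter isT0B with
      | cons s t =>
        have hfz : (x :: (xs' ++ [z])).filter isT0B = s :: (t ++ [z].filter isT0B) := by
          rw [← List.cons_append, List.filter_append, hf]; rfl
        rw [a_eq_t0 _ _ _ _ hfz]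
        have hm : s = xs'.foldl gP x := by
          have := (a_eq_t0 x xs' s t hf).symm.trans ih; injection this
        have hT0 : isT0B s = true := List.of_mem_filter (l := x :: xs') (by rw [hf]; simp)
        rw [← hm, gP_of_t0_left s z hT0]
      | nil =>
        have hnoT0 : ∀ y ∈ x :: xs', isT0B y = false := by
          intro y hy
          by_contra hc
          have : y ∈ (x :: xs').filter isT0B := List.mem_filter.2 ⟨hy, by simpa using hc⟩
          rw [hf] at this; simp at this
        by_cases hz0 : isT0B z = true
        · have hfz : (x :: (xs' ++ [z])).filter isT0B = [z] := by
            rw [← List.cons_append, List.filter_append, hf, List.nil_append]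
            simp [hz0]
          rw [a_eq_t0 _ _ _ _ hfz]
          cases hst : (x :: xs').filter isStarterB with
          | cons s ss =>
            have hm : ss.foldl gS s = xs'.foldl gP x := by
              have := (a_eq_st x xs' s ss hf hst).symm.trans ih; injection this
            have hmemf : ss.foldl gS s ∈ (x :: xs').filter isStarterB := by
              rw [hst]; exact foldl_pick_mem gS gS_choice ss s
            have hnot0 : isT0B (ss.foldl gS s) = false :=
              hnoT0 _ (List.mem_of_mem_filter hmemf)
            rw [← hm, gP_of_t0_right _ z hz0 hnot0]
          | nil =>
            have hm : xs'.foldl gS x = xs'.foldl gP x := by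
              have := (a_eq_no x xs' hf hst).symm.trans ih; injection this
            have hnot0 : isT0B (xs'.foldl gS x) = false :=
              hnoT0 _ (foldl_pick_mem gS gS_choice xs' x)
            rw [← hm, gP_of_t0_right _ z hz0 hnot0]
        · have hfz : (x :: (xs' ++ [z])).filter isT0B = [] := by
            rw [← List.cons_append, List.filter_append, hf, List.nil_append]
            simp [hz0]
          cases hst : (x :: xs').filter isStarterB with
          | cons s ss =>
            have hm : ss.foldl gS s = xs'.foldl gP x := by
              have := (a_eq_st x xs' s ss hf hst).symm.trans ih; injection this
            have hmemf : ss.foldl gS s ∈ (x :: xs').filter isStarterB := by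
              rw [hst]; exact foldl_pick_mem gS gS_choice ss s
            have hstar : isStarterB (ss.foldl gS s) = true := List.of_mem_filter hmemf
            have hnot0 : isT0B (ss.foldl gS s) = false :=
              hnoT0 _ (List.mem_of_mem_filter hmemf)
            have htm : tierOf (ss.foldl gS s) = 1 := tierOf_eq_one _ hnot0 hstar
            by_cases hzs : isStarterB z = true
            · have hsz : (x :: (xs' ++ [z])).filter isStarterB = s :: (ss ++ [z]) := by
                rw [← List.cons_append, List.filter_append, hst]
                simp [hzs]
              rw [a_eq_st _ _ _ _ hfz hsz, List.foldl_append, List.foldl_cons, List.foldl_nil]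
              rw [hm, ← gP_eq_gS_of_tier]
              rw [← hm] at *
              rw [htm, tierOf_eq_one z (by simpa using hz0) hzs]
            · have hsz : (x :: (xs' ++ [z])).filter isStarterB = s :: ss := by
                rw [← List.cons_append, List.filter_append, hst]
                simp [hzs]
              rw [a_eq_st _ _ _ _ hfz hsz, hm]
              rw [gP_keep_of_tier_lt]
              rw [← hm, htm, tierOf_eq_two z (by simpa using hz0) (by simpa using hzs)]
              omega
          | nil =>
            have hm : xs'.foldl gS x = xs'.foldl gP x := by
              have := (a_eq_no x xs' hf hst).symm.trans ih; injection this
            have hnostar : ∀ y ∈ x :: xs', isStarterB y = false := by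
              intro y hy
              by_contra hc
              have : y ∈ (x :: xs').filter isStarterB := List.mem_filter.2 ⟨hy, by simpa using hc⟩
              rw [hst] at this; simp at this
            have hmemx : xs'.foldl gS x ∈ x :: xs' := foldl_pick_mem gS gS_choice xs' x
            have hstar : isStarterB (xs'.foldl gS x) = false := hnostar _ hmemx
            have hnot0 : isT0B (xs'.foldl gS x) = false := hnoT0 _ hmemx
            have htm : tierOf (xs'.foldl gS x) = 2 := tierOf_eq_two _ hnot0 hstar
            by_cases hzs : isStarterB z = true
            · have hsz : (x :: (xs' ++ [z])).filter isStarterB = [z] := by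
                rw [← List.cons_append, List.filter_append, hst, List.nil_append]
                simp [hzs]
              rw [a_eq_st _ _ _ _ hfz hsz, List.foldl_nil, ← hm,
                gP_take_of_tier_lt _ z
                  (by rw [htm, tierOf_eq_one z (by simpa using hz0) hzs]; omega)]
            · have hsz : (x :: (xs' ++ [z])).filter isStarterB = [] := by
                rw [← List.cons_append, List.filter_append, hst, List.nil_append]
                simp [hzs]
              rw [a_eq_no _ _ hfz hsz, List.foldl_append, List.foldl_cons, List.foldl_nil]
              rw [hm, ← gP_eq_gS_of_tier]
              rw [← hm] at *
              rw [htm, tierOf_eq_two z (by simpa using hz0) (by simpa using hzs)]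

-- ===== VERDICT (by name: the statement is the Claim_ definition above) =====
theorem pick_primary_position_py_spec : Claim_equal_pick_primary_position_py := by
  intro positions _
  unfold Spec_pick_primary_position_py
  exact main_eq positions
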